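-- pv_equiv track=rewrite | github.com/JYKai/python | coding_problem/problem_list1/32_전력망을 둘로 나누기/86971.py | solution
-- ===== SOURCE A (Python) =====
-- from collections import defaultdict
--
-- def solution(n, wires):
--     answer = float('inf')
--
--     def DFS(node, visited, graph):
--         count = 1
--         visited[node] = True
--         for next_node in graph[node]:
--             if not visited[next_node]:
--                 count += DFS(next_node, visited, graph)
--         return count
--
--     tree = defaultdict(list)
--
--     for s, e in wires:
--         tree[s].append(e)
--         tree[e].append(s)
--
--     for s, e in wires:
--         tree[s].remove(e)
--         tree[e].remove(s)
--
--         visited = [False] * (n + 1)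
--
--         count = DFS(s, visited, tree)
--         diff = abs(count - (n - count))
--         answer = min(diff, answer)
--
--         tree[s].append(e)
--         tree[e].append(s)
--
--     return answer
-- ===== SOURCE B (Python) =====
-- def solution(n, wires):
--     # Iterative DFS with an explicit stack of pending neighbour lists instead of
--     # A's recursive DFS; nodes are counted when first visited instead of summed
--     # over recursive return values, and the split size difference is |2*count - n|.
--     adj = {}
--     for s, e in wires:
--         adj.setdefault(s, []).append(e)
--         adj.setdefault(e, []).append(s)
--
--     best = None
--     for s, e in wires:
--         adj[s].remove(e)
--         adj[e].remove(s)
--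
--         visited = [False] * (n + 1)
--         visited[s] = True
--         count = 1
--         stack = [list(adj[s])]
--         while stack:
--             lst = stack.pop()
--             if not lst:
--                 continue
--             h = lst[0]
--             stack.append(lst[1:])
--             if not visited[h]:
--                 visited[h] = True
--                 count += 1
--                 stack.append(list(adj.get(h, [])))
--
--         diff = abs(2 * count - n)
--         best = diff if best is None else min(diff, best)
--
--         adj[s].append(e)
--         adj[e].append(s)
--
--     return best
-- ===== Notes on version B (the rewrite author's own statement) =====
-- stated objective: alternative
-- what changed: A's recursive DFS (counts summed over recursive return values) is replaced by an iterative DFS driven by an explicit stack of pending neighbour lists, counting each node when it is first marked visited, with the split difference computed as |2*count - n|; the edge loop keeps A's remove/traverse/re-append pattern.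
-- outside the precondition, e.g. on solution(2, [(0, 5)]): A returns 0, B returns 0; on solution(2, []): A returns inf, B returns None
import Mathlib
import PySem

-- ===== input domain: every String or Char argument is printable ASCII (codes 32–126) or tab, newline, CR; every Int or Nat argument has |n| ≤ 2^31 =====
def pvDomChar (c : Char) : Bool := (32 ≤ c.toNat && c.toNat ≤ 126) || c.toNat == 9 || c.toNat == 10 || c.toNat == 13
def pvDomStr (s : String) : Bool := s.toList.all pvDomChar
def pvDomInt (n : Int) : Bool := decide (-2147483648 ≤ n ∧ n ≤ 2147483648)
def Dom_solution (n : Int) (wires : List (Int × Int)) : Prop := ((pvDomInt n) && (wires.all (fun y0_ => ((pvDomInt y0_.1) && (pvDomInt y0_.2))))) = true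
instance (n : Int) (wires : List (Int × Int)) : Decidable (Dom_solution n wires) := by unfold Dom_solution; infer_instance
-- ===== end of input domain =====

-- B replaces A's recursive DFS by an explicit-stack iterative DFS that counts nodes when
-- first visited (objective: alternative). A mutates only its internal adjacency dict.


-- ===== PORT A =====
-- tree[s].append(e) on the defaultdict(list): tree[s] = tree.get(s, []) + [e]
def treeAdd (t : PySem.Dict Int (List Int)) (s e : Int) : PySem.Dict Int (List Int) :=
  (t.modify s [] (· ++ [e])).modify e [] (· ++ [s])

-- tree[s].remove(e) / tree[e].remove(s); list.remove drops the first occurrence.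
-- The .getD fallback is a totality guard only: in solution's loop the removed value
-- is always present (it was appended when the adjacency dict was built).
def treeDel (t : PySem.Dict Int (List Int)) (s e : Int) : PySem.Dict Int (List Int) :=
  (t.modify s [] (fun l => (PySem.List.remove? l e).getD l)).modify e [] (fun l => (PySem.List.remove? l s).getD l)

-- A's recursive DFS: visited[node] = True is pySetD, `if not visited[next_node]` is the
-- pyGet? guard (none = IndexError, excluded by Pre_). The Nat argument is a fuel/totality
-- guard only: every recursive call flips one visited entry from false to true, so the
-- fuel (length visited + 1) passed in `solution` is never exhausted (lemma sim below).
mutual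
def dfsA (g : PySem.Dict Int (List Int)) : Nat → Int → List Bool → Int × List Bool
  | 0, _, v => (1, v)
  | f + 1, node, v => goA g f (g.getD node []) (PySem.List.pySetD v node true) 1
termination_by f _ _ => (f, 0)
def goA (g : PySem.Dict Int (List Int)) : Nat → List Int → List Bool → Int → Int × List Bool
  | _, [], v, c => (c, v)
  | f, x :: xs, v, c =>
    if PySem.List.pyGet? v x = some false then
      let r := dfsA g f x v
      goA g f xs r.2 (c + r.1)
    else goA g f xs v c
termination_by f l _ _ => (f, l.length + 1)
end

-- answer starts at float('inf'), ported as `none`; Pre_ requires wires ≠ [], so the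
-- final .getD 0 is dead code.
def solution (n : Int) (wires : List (Int × Int)) : Int :=
  let tree := wires.foldl (fun t p => treeAdd t p.1 p.2) PySem.Dict.empty
  let r := wires.foldl (fun (st : Option Int × PySem.Dict Int (List Int)) p =>
      let t1 := treeDel st.2 p.1 p.2
      let v0 : List Bool := List.replicate (n + 1).toNat false
      let count := (dfsA t1 (v0.length + 1) p.1 v0).1
      let diff := |count - (n - count)|
      let ans := match st.1 with | none => some diff | some a => some (min diff a)
      (ans, treeAdd t1 p.1 p.2)) (none, tree)
  r.1.getD 0

-- ===== PORT B =====
-- Needed by loopB's termination: flipping a false visited entry to true removes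
-- exactly one false.
lemma countFalse_pySetD (v : List Bool) (i : Int) (h : PySem.List.pyGet? v i = some false) :
    (PySem.List.pySetD v i true).count false + 1 = v.count false := by
  simp only [PySem.List.pyGet?] at h
  rcases hj : PySem.List.pyIdx? v.length i with _ | j
  · rw [hj] at h; simp at h
  · rw [hj] at h
    simp only [Option.bind_some] at h
    have hjlt : j < v.length := by
      simp only [PySem.List.pyIdx?] at hj
      split_ifs at hj <;> simp_all <;> omega
    have hvj : v[j] = false := by
      rw [List.getElem?_eq_getElem hjlt] at h; simpa using h
    have hcnt := List.count_set (a := true) (b := false) (l := v) (i := j) hjlt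
    have hpos : 0 < v.count false :=
      List.count_pos_iff.mpr (hvj ▸ List.getElem_mem hjlt)
    simp only [PySem.List.pySetD, PySem.List.pySet?, hj, Option.map_some, Option.getD_some]
    simp [hvj] at hcnt
    omega

-- B's while loop over the explicit stack of pending neighbour lists; it terminates
-- because each iteration either flips a visited entry from false to true or shrinks
-- the stack contents.
def loopB (g : PySem.Dict Int (List Int)) : List (List Int) → List Bool → Int → Int
  | [], _, c => c
  | [] :: stk, v, c => loopB g stk v c
  | (h :: rest) :: stk, v, c =>
    if hvis : PySem.List.pyGet? v h = some false then
      loopB g (g.getD h [] :: rest :: stk) (PySem.List.pySetD v h true) (c + 1)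
    else loopB g (rest :: stk) v c
termination_by stk v _ => (v.count false, (stk.map (·.length + 1)).sum)
decreasing_by
  · exact Prod.Lex.right _ (by simp)
  · exact Prod.Lex.left _ _ (by have := countFalse_pySetD v h hvis; omega)
  · exact Prod.Lex.right _ (by simp)

-- adj.setdefault(s, []).append(e) mutates adj[s] exactly as adj[s] = adj.get(s, []) + [e],
-- i.e. treeAdd; B's per-edge remove / re-append are the same dict operations as A's
-- (treeDel / treeAdd). best starts as None, ported as `none` (.getD 0 dead under Pre_).
def solution_alt (n : Int) (wires : List (Int × Int)) : Int :=
  let adj := wires.foldl (fun t p => treeAdd t p.1 p.2) PySem.Dict.empty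
  let r := wires.foldl (fun (st : Option Int × PySem.Dict Int (List Int)) p =>
      let t1 := treeDel st.2 p.1 p.2
      let v0 : List Bool := List.replicate (n + 1).toNat false
      let count := loopB t1 [t1.getD p.1 []] (PySem.List.pySetD v0 p.1 true) 1
      let diff := |2 * count - n|
      let best := match st.1 with | none => some diff | some a => some (min diff a)
      (best, treeAdd t1 p.1 p.2)) (none, adj)
  r.1.getD 0

-- ===== PRECONDITION & SPEC =====
-- Pre_ excludes: empty wires (A returns float('inf'), not an int; B returns None);
-- n < 0 (the visited list is empty, so visited[s] raises IndexError); and any wire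
-- endpoint outside [-(n+1), n] (visiting such a node raises IndexError; since
-- reachability is not closed-form, this also drops some inputs where A returns
-- because the out-of-range endpoint is never visited — see cites).
def Pre_solution (n : Int) (wires : List (Int × Int)) : Prop :=
  wires ≠ [] ∧ 0 ≤ n ∧ ∀ p ∈ wires, (-(n + 1) ≤ p.1 ∧ p.1 ≤ n) ∧ (-(n + 1) ≤ p.2 ∧ p.2 ≤ n)
instance (n : Int) (wires : List (Int × Int)) : Decidable (Pre_solution n wires) := by
  unfold Pre_solution; infer_instance

def pvWitness_solution : Int × (List (Int × Int)) := (4, [(1, 3), (2, 3), (3, 4)])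

def Spec_solution (n : Int) (wires : List (Int × Int)) (out : Int) : Prop := out = solution_alt n wires
instance (n : Int) (wires : List (Int × Int)) (out : Int) : Decidable (Spec_solution n wires out) := by unfold Spec_solution; infer_instance

-- ===== CLAIM (what is proved, stated in full; the proofs are below) =====
def Claim_equal_solution : Prop := ∀ (n : Int) (wires : List (Int × Int)), Dom_solution n wires → Pre_solution n wires → Spec_solution n wires (solution n wires)

-- ===== LEMMAS AND PROOFS =====

-- pySetD with `true` never increases the number of false entries
lemma countFalse_pySetD_le (v : List Bool) (i : Int) :
    (PySem.List.pySetD v i true).count false ≤ v.count false := by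
  rcases hj : PySem.List.pyIdx? v.length i with _ | j
  · simp [PySem.List.pySetD, PySem.List.pySet?, hj]
  · have hjlt : j < v.length := by
      simp only [PySem.List.pyIdx?] at hj
      split_ifs at hj <;> simp_all <;> omega
    have hcnt := List.count_set (a := true) (b := false) (l := v) (i := j) hjlt
    simp only [PySem.List.pySetD, PySem.List.pySet?, hj, Option.map_some, Option.getD_some]
    rcases hvj : v[j] <;> simp [hvj] at hcnt <;> omega

-- A's DFS only turns visited entries from false to true
lemma countFalse_goA (g : PySem.Dict Int (List Int)) :
    ∀ (f : Nat) (l : List Int) (v : List Bool) (c : Int),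
      (goA g f l v c).2.count false ≤ v.count false := by
  intro f
  induction f using Nat.strong_induction_on with
  | _ f IH =>
    intro l
    induction l with
    | nil => intro v c; simp [goA]
    | cons x xs ihl =>
      intro v c
      rw [goA]
      split_ifs with hvis
      · cases f with
        | zero => simpa [dfsA] using ihl v (c + 1)
        | succ f' =>
          refine le_trans (ihl _ _) ?_
          show (dfsA g (f' + 1) x v).2.count false ≤ v.count false
          rw [dfsA]
          exact le_trans (IH f' (Nat.lt_succ_self _) _ _ _) (countFalse_pySetD_le v x)
      · exact ihl v c

-- shifting goA's running count
lemma goA_shift (g : PySem.Dict Int (List Int)) (f : Nat) (l : List Int) :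
    ∀ (v : List Bool) (c d : Int),
      goA g f l v (c + d) = ((goA g f l v c).1 + d, (goA g f l v c).2) := by
  induction l with
  | nil => intro v c d; simp [goA]
  | cons x xs ihl =>
    intro v c d
    rw [goA, goA]
    split_ifs with hvis
    · show goA g f xs _ (c + d + _) = _
      rw [show c + d + (dfsA g f x v).1 = (c + (dfsA g f x v).1) + d by ring]
      exact ihl _ _ _
    · exact ihl v c d

-- the simulation: B's stack machine consumes the top pending neighbour list exactly
-- as A's recursive neighbour loop does, provided A's fuel exceeds the number of
-- unvisited entries
lemma sim (g : PySem.Dict Int (List Int)) (k : Nat) :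
    ∀ (l : List Int) (v : List Bool) (stk : List (List Int)) (c : Int) (f : Nat),
      v.count false ≤ k → v.count false < f →
      loopB g (l :: stk) v c = loopB g stk (goA g f l v c).2 (goA g f l v c).1 := by
  induction k using Nat.strong_induction_on with
  | _ k IH =>
    intro l
    induction l with
    | nil => intro v stk c f hk hf; rw [loopB, goA]
    | cons x xs ihl =>
      intro v stk c f hk hf
      rw [loopB, goA]
      split_ifs with hvis
      · have hdrop := countFalse_pySetD v x hvis
        obtain ⟨f', rfl⟩ : ∃ f', f = f' + 1 := ⟨f - 1, by omega⟩
        rw [dfsA]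
        set v1 := PySem.List.pySetD v x true with hv1
        rw [IH (k - 1) (by omega) _ v1 (xs :: stk) (c + 1) f' (by omega) (by omega)]
        have hshift : goA g f' (g.getD x []) v1 (c + 1) =
            ((goA g f' (g.getD x []) v1 1).1 + c, (goA g f' (g.getD x []) v1 1).2) := by
          rw [show (c + 1 : Int) = 1 + c by ring]; exact goA_shift g f' _ v1 1 c
        rw [hshift]
        have hle2 : (goA g f' (g.getD x []) v1 1).2.count false ≤ k - 1 :=
          le_trans (countFalse_goA g f' _ v1 1) (by omega)
        rw [IH (k - 1) (by omega) xs _ stk _ (f' + 1) hle2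
              (by have := countFalse_goA g f' (g.getD x []) v1 1; omega)]
        rw [show (goA g f' (g.getD x []) v1 1).1 + c
              = c + (goA g f' (g.getD x []) v1 1).1 by ring]
      · exact ihl v stk c f hk hf

lemma pyGet_replicate_false (m : Nat) (s : Int) (hs : -(m : Int) ≤ s ∧ s < m) :
    PySem.List.pyGet? (List.replicate m false) s = some false := by
  simp only [PySem.List.pyGet?, PySem.List.pyIdx?, List.length_replicate]
  split_ifs with h1 h2 h3
  · simp only [Option.bind_some]
    rw [List.getElem?_replicate]
    simp; omega
  · omega
  · simp only [Option.bind_some]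
    rw [List.getElem?_replicate]
    simp; omega
  · omega

-- per edge: A's DFS count equals B's stack count
lemma count_eq (g : PySem.Dict Int (List Int)) (m : Nat) (s : Int)
    (hs : -(m : Int) ≤ s ∧ s < m) :
    (dfsA g (m + 1) s (List.replicate m false)).1
      = loopB g [g.getD s []] (PySem.List.pySetD (List.replicate m false) s true) 1 := by
  have hget := pyGet_replicate_false m s hs
  have hdrop := countFalse_pySetD (List.replicate m false) s hget
  rw [dfsA]
  rw [sim g ((PySem.List.pySetD (List.replicate m false) s true).count false)
        (g.getD s []) _ [] 1 m (le_refl _)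
        (by have : (List.replicate m false).count false = m := by simp
            omega)]
  rw [loopB]

-- ===== VERDICT (by name: the statement is the Claim_ definition above) =====
theorem solution_spec : Claim_equal_solution := by
  intro n wires _ hpre
  unfold Spec_solution
  obtain ⟨hne, hn, hbnd⟩ := hpre
  unfold solution solution_alt
  have hfold := PySem.List.foldl_congr_mem'
    (l := wires)
    (init := ((none : Option Int), wires.foldl (fun t p => treeAdd t p.1 p.2) PySem.Dict.empty))
    (f := fun (st : Option Int × PySem.Dict Int (List Int)) p =>
      let t1 := treeDel st.2 p.1 p.2
      let v0 : List Bool := List.replicate (n + 1).toNat false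
      let count := (dfsA t1 (v0.length + 1) p.1 v0).1
      let diff := |count - (n - count)|
      let ans := match st.1 with | none => some diff | some a => some (min diff a)
      (ans, treeAdd t1 p.1 p.2))
    (g := fun (st : Option Int × PySem.Dict Int (List Int)) p =>
      let t1 := treeDel st.2 p.1 p.2
      let v0 : List Bool := List.replicate (n + 1).toNat false
      let count := loopB t1 [t1.getD p.1 []] (PySem.List.pySetD v0 p.1 true) 1
      let diff := |2 * count - n|
      let best := match st.1 with | none => some diff | some a => some (min diff a)
      (best, treeAdd t1 p.1 p.2))
    ?_
  · exact (congrArg (fun r : Option Int × PySem.Dict Int (List Int) => r.1.getD 0) hfold)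
  · intro p hp acc
    simp only []
    have hsb : -(((n + 1).toNat : Nat) : Int) ≤ p.1 ∧ p.1 < ((n + 1).toNat : Nat) := by
      have := (hbnd p hp).1; omega
    have hc := count_eq (treeDel acc.2 p.1 p.2) ((n + 1).toNat) p.1 hsb
    simp only [List.length_replicate] at hc ⊢
    rw [hc]
    have habs : ∀ c : Int, |c - (n - c)| = |2 * c - n| := by
      intro c; congr 1; ring
    rw [habs]
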